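-- pv_equiv track=rewrite | github.com/ASOCIACIONAEDIA/toonkit | toonkit/core/encoder.py | _encode_key
-- ===== SOURCE A (Python) =====
-- def _encode_key(key: str) -> str:
--     """Encode object key, quoting if necessary."""
--     # Quote keys with special chars or whitespace issues
--     needs_quotes = (
--         not key  # Empty key
--         or key != key.strip()  # Has leading/trailing whitespace
--         or key.isspace()  # Only whitespace
--         or ':' in key  # Contains colon
--         or '\n' in key or '\r' in key or '\t' in key  # Control chars
--         or any(ord(c) < 32 for c in key)  # Other control chars
--     )
--     if needs_quotes:
--         escaped = key.replace("\\", "\\\\")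
--         escaped = escaped.replace('"', '\\"')
--         escaped = escaped.replace('\n', '\\n')
--         escaped = escaped.replace('\r', '\\r')
--         escaped = escaped.replace('\t', '\\t')
--         return f'"{escaped}"'
--     return key
-- ===== SOURCE B (Python) =====
-- _ESCAPES = {'\\': '\\\\', '"': '\\"', '\n': '\\n', '\r': '\\r', '\t': '\\t'}
--
--
-- def _encode_key(key: str) -> str:
--     """Encode object key, quoting if necessary (single-pass table-driven escape)."""
--     if key and key == key.strip() and ':' not in key and not any(ord(c) < 32 for c in key):
--         return key
--     return '"' + ''.join(_ESCAPES.get(c, c) for c in key) + '"'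
-- ===== Notes on version B (the rewrite author's own statement) =====
-- stated objective: idiomatic
-- what changed: B replaces A's five sequential full-string .replace passes with one table-driven pass (dict lookup per character joined once), and collapses A's eight-clause needs_quotes test to its four non-redundant clauses inverted as a keep-as-is guard.
import Mathlib
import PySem

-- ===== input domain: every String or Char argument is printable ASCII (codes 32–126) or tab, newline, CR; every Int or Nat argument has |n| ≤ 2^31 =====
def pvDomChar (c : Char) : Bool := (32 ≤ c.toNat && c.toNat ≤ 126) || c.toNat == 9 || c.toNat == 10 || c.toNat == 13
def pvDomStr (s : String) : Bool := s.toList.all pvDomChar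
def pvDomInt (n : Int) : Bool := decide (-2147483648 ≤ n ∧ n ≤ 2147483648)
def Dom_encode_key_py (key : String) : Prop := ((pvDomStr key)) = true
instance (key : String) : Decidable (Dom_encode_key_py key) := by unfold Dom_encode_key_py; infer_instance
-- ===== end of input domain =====

-- B escapes in ONE table-driven pass (a dict lookup per character, joined once) instead of A's five
-- sequential .replace passes, and inverts A's redundant needs_quotes clauses into a four-clause keep guard.


-- ===== PORT A =====
def encode_key_py (key : String) : String :=
  let needs_quotes : Bool :=
    (PySem.Str.len key == 0)
    || (key != PySem.Str.strip key)
    || PySem.Str.strIsspace key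
    || PySem.Str.isIn ":" key
    || PySem.Str.isIn "\n" key || PySem.Str.isIn "\r" key || PySem.Str.isIn "\t" key
    || key.toList.any (fun c => c.toNat < 32)
  if needs_quotes then
    let escaped := PySem.Str.replace key "\\" "\\\\"
    let escaped := PySem.Str.replace escaped "\"" "\\\""
    let escaped := PySem.Str.replace escaped "\n" "\\n"
    let escaped := PySem.Str.replace escaped "\r" "\\r"
    let escaped := PySem.Str.replace escaped "\t" "\\t"
    String.ofList ('"' :: escaped.toList ++ ['"'])   -- f'"{escaped}"'
  else key

-- ===== PORT B =====
-- _ESCAPES, the module-level translation dict of Source B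
def pvEscTable : PySem.Dict Char String :=
  PySem.Dict.ofList [('\\', "\\\\"), ('"', "\\\""), ('\n', "\\n"), ('\r', "\\r"), ('\t', "\\t")]

def encode_key_py_alt (key : String) : String :=
  if (!(PySem.Str.len key == 0)) && (key == PySem.Str.strip key)
      && (!PySem.Str.isIn ":" key) && (!key.toList.any (fun c => c.toNat < 32)) then
    key
  else
    let body := PySem.Str.join "" (key.toList.map (fun c => pvEscTable.getD c (String.ofList [c])))
    String.ofList ('"' :: body.toList ++ ['"'])   -- '"' + ''.join(...) + '"'

-- ===== PRECONDITION & SPEC =====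
def Spec_encode_key_py (key : String) (out : String) : Prop := out = encode_key_py_alt key
instance (key : String) (out : String) : Decidable (Spec_encode_key_py key out) := by unfold Spec_encode_key_py; infer_instance

-- ===== CLAIM (what is proved, stated in full; the proofs are below) =====
def Claim_equal_encode_key_py : Prop := ∀ (key : String), Dom_encode_key_py key → Spec_encode_key_py key (encode_key_py key)

-- ===== LEMMAS AND PROOFS =====

-- the per-character escape obtained by composing A's five single-character replaces
def pvEsc (c : Char) : List Char :=
  if c = '\\' then ['\\', '\\']
  else if c = '"' then ['\\', '"']
  else if c = '\n' then ['\\', 'n']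
  else if c = '\r' then ['\\', 'r']
  else if c = '\t' then ['\\', 't']
  else [c]

theorem replace_go_single (a : Char) (r : List Char) :
    ∀ (l : List Char) (fuel : Nat) (acc : List Char), l.length ≤ fuel →
      PySem.Chars.replace.go [a] r fuel l acc
        = acc.reverse ++ l.flatMap (fun c => if c = a then r else [c]) := by
  intro l
  induction l with
  | nil => intro fuel acc h; cases fuel <;> simp [PySem.Chars.replace.go]
  | cons c t ih =>
    intro fuel acc h
    cases fuel with
    | zero => simp at h
    | succ n =>
      rw [PySem.Chars.replace.go]
      simp only [List.length_cons] at h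
      by_cases hc : a = c
      · subst hc
        simp [ih n _ (by omega)]
      · simp [hc, ih n _ (by omega), show ¬c = a from fun h => hc h.symm]

theorem replace_single (a : Char) (r l : List Char) :
    PySem.Chars.replace l [a] r = l.flatMap (fun c => if c = a then r else [c]) := by
  rw [PySem.Chars.replace]
  simp [replace_go_single a r l l.length [] (le_refl _)]

-- A's five sequential replace passes compose to one flatMap of pvEsc
theorem chain_eq_flatMap (l : List Char) :
    (PySem.Chars.replace (PySem.Chars.replace (PySem.Chars.replace (PySem.Chars.replace
      (PySem.Chars.replace l ['\\'] ['\\', '\\']) ['"'] ['\\', '"']) ['\n'] ['\\', 'n'])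
      ['\r'] ['\\', 'r']) ['\t'] ['\\', 't'])
      = l.flatMap pvEsc := by
  simp only [replace_single, List.flatMap_assoc]
  refine List.flatMap_congr ?_
  intro c _
  unfold pvEsc
  split_ifs with h1 h2 h3 h4 h5 <;> simp [*]

theorem mem_of_isIn_single (a : Char) (s : String) (t : String) (ht : t.toList = [a])
    (h : PySem.Str.isIn t s = true) : a ∈ s.toList := by
  rw [PySem.Str.isIn_iff_infix, ht, List.singleton_infix_iff] at h
  exact h

-- a nonempty all-whitespace key strips to "", hence differs from its strip
theorem isspace_ne_strip (key : String)
    (hsp : PySem.Str.strIsspace key = true) : key ≠ PySem.Str.strip key := by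
  intro h
  have hl : key.toList = (PySem.Str.strip key).toList := by rw [← h]
  rw [PySem.Str.toList_strip] at hl
  rw [PySem.Str.strIsspace_eq, PySem.Chars.strIsspace] at hsp
  simp only [Bool.and_eq_true, List.all_eq_true, Bool.not_eq_true'] at hsp
  have hls : PySem.Chars.lstrip key.toList = [] := by
    rw [PySem.Chars.lstrip]
    exact List.dropWhile_eq_nil_iff.mpr (fun x hx => hsp.2 x hx)
  rw [PySem.Chars.strip, hls] at hl
  simp [PySem.Chars.rstrip] at hl
  simp [hl] at hsp

theorem any_of_isIn (a : Char) (s t : String) (ht : t.toList = [a]) (ha : a.toNat < 32)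
    (h : PySem.Str.isIn t s = true) : (s.toList.any (fun c => c.toNat < 32)) = true :=
  List.any_eq_true.mpr ⟨a, mem_of_isIn_single a s t ht h, by simpa using ha⟩

-- B's keep guard is the negation of A's needs_quotes (A's isspace and \n\r\t clauses are redundant)
theorem guards_eq (key : String) :
    ((!(PySem.Str.len key == 0)) && (key == PySem.Str.strip key)
      && (!PySem.Str.isIn ":" key) && (!key.toList.any (fun c => c.toNat < 32)))
    = !((PySem.Str.len key == 0)
        || (key != PySem.Str.strip key)
        || PySem.Str.strIsspace key
        || PySem.Str.isIn ":" key
        || PySem.Str.isIn "\n" key || PySem.Str.isIn "\r" key || PySem.Str.isIn "\t" key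
        || key.toList.any (fun c => c.toNat < 32)) := by
  rw [Bool.eq_iff_iff]
  simp only [Bool.and_eq_true, Bool.not_eq_eq_eq_not, Bool.not_true,
    Bool.or_eq_false_iff, beq_eq_false_iff_ne, bne_eq_false_iff_eq, beq_iff_eq, ne_eq]
  constructor
  · rintro ⟨⟨⟨h0, hstrip⟩, hcolon⟩, hctl⟩
    refine ⟨⟨⟨⟨⟨⟨⟨?_, hstrip⟩, ?_⟩, hcolon⟩, ?_⟩, ?_⟩, ?_⟩, hctl⟩
    · simpa using h0
    · by_contra hsp
      exact isspace_ne_strip key (by simpa using hsp) hstrip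
    all_goals
      by_contra hin
      rw [Bool.not_eq_false] at hin
    · exact absurd (any_of_isIn '\n' key "\n" (by decide) (by decide) hin) (by simp [hctl])
    · exact absurd (any_of_isIn '\r' key "\r" (by decide) (by decide) hin) (by simp [hctl])
    · exact absurd (any_of_isIn '\t' key "\t" (by decide) (by decide) hin) (by simp [hctl])
  · rintro ⟨⟨⟨⟨⟨⟨⟨h0, hstrip⟩, _⟩, hcolon⟩, _⟩, _⟩, _⟩, hctl⟩
    exact ⟨⟨⟨by simpa using h0, hstrip⟩, hcolon⟩, hctl⟩

theorem escT_toList (c : Char) : (pvEscTable.getD c (String.ofList [c])).toList = pvEsc c := by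
  unfold pvEsc
  split_ifs with h1 h2 h3 h4 h5
  · subst h1; decide
  · subst h2; decide
  · subst h3; decide
  · subst h4; decide
  · subst h5; decide
  · have e1 : ('\\' == c) = false := beq_eq_false_iff_ne.mpr (Ne.symm h1)
    have e2 : ('"' == c) = false := beq_eq_false_iff_ne.mpr (Ne.symm h2)
    have e3 : ('\n' == c) = false := beq_eq_false_iff_ne.mpr (Ne.symm h3)
    have e4 : ('\r' == c) = false := beq_eq_false_iff_ne.mpr (Ne.symm h4)
    have e5 : ('\t' == c) = false := beq_eq_false_iff_ne.mpr (Ne.symm h5)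
    simp [pvEscTable, PySem.Dict.ofList, PySem.Dict.update, PySem.Dict.insert, PySem.Dict.contains,
      PySem.Dict.empty, PySem.Dict.getD, PySem.Dict.get?, List.find?, e1, e2, e3, e4, e5]

theorem intersperse_nil_flatten (xs : List (List Char)) :
    (List.intersperse [] xs).flatten = xs.flatten := by
  match xs with
  | [] => rfl
  | [x] => rfl
  | x :: y :: t =>
    rw [List.intersperse_cons₂]
    simp [intersperse_nil_flatten (y :: t)]

-- B's joined per-character lookups spell out to the same flatMap of pvEsc
theorem body_toList (key : String) :
    (PySem.Str.join "" (key.toList.map (fun c => pvEscTable.getD c (String.ofList [c])))).toList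
      = key.toList.flatMap pvEsc := by
  rw [PySem.Str.toList_join]
  simp only [PySem.Chars.join, List.intercalate]
  rw [show ("".toList) = ([] : List Char) from rfl, intersperse_nil_flatten,
    List.flatMap_def, List.map_map]
  congr 1
  exact List.map_congr_left (fun c _ => escT_toList c)

-- ===== VERDICT (by name: the statement is the Claim_ definition above) =====
theorem encode_key_py_spec : Claim_equal_encode_key_py := by
  intro key _
  unfold Spec_encode_key_py
  unfold encode_key_py encode_key_py_alt
  rw [guards_eq key]
  cases hnq : ((PySem.Str.len key == 0)
        || (key != PySem.Str.strip key)
        || PySem.Str.strIsspace key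
        || PySem.Str.isIn ":" key
        || PySem.Str.isIn "\n" key || PySem.Str.isIn "\r" key || PySem.Str.isIn "\t" key
        || key.toList.any (fun c => c.toNat < 32)) with
  | false => simp
  | true =>
    simp only [Bool.not_true, Bool.false_eq_true, if_false, if_true]
    refine congrArg String.ofList ?_
    simp only [PySem.Str.replace, String.toList_ofList]
    rw [body_toList key, ← chain_eq_flatMap key.toList,
      show "\\".toList = ['\\'] from by decide, show "\\\\".toList = ['\\', '\\'] from by decide,
      show "\"".toList = ['"'] from by decide, show "\\\"".toList = ['\\', '"'] from by decide,
      show "\n".toList = ['\n'] from by decide, show "\\n".toList = ['\\', 'n'] from by decide,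
      show "\r".toList = ['\r'] from by decide, show "\\r".toList = ['\\', 'r'] from by decide,
      show "\t".toList = ['\t'] from by decide, show "\\t".toList = ['\\', 't'] from by decide]
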